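-- pv_equiv track=rewrite | github.com/minsuh99/PNU_DS_CodingTestStudy | 12주차/문제4/박민서_기지국 설치.py | solution
-- ===== SOURCE A (Python) =====
-- def solution(n, stations, w):
--     answer = 0
--
--     my_list = [0 for _ in range(n)]
--
--     for station in stations:
--         left = max(0, station - 1 - w)
--         right = min(n - 1, station - 1 + w)
--         for i in range(left, right + 1):
--             my_list[i] = 1
--
--     count_zero = 0
--     for i in range(n):
--         if my_list[i] == 0:
--             count_zero += 1
--         else:
--             answer += count_zero // (2 * w + 1) if count_zero % (2 * w + 1) == 0 else count_zero // (2 * w + 1) + 1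
--             count_zero = 0
--     if count_zero > 0:
--         answer += count_zero // (2 * w + 1) if count_zero % (2 * w + 1) == 0 else count_zero // (2 * w + 1) + 1
--     return answer
-- ===== SOURCE B (Python) =====
-- def _need(gap, d):
--     return gap // d if gap % d == 0 else gap // d + 1
--
-- def solution(n, stations, w):
--     d = 2 * w + 1
--     intervals = sorted(((max(0, s - 1 - w), min(n - 1, s - 1 + w)) for s in stations),
--                        key=lambda iv: iv[0])
--     answer = 0
--     pos = 0  # next position not yet known to be covered
--     for l, r in intervals:
--         if r < l:
--             continue
--         if l > pos:
--             answer += _need(l - pos, d)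
--         if r + 1 > pos:
--             pos = r + 1
--     if pos < n:
--         answer += _need(n - pos, d)
--     return answer
-- ===== Notes on version B (the rewrite author's own statement) =====
-- stated objective: faster
-- what changed: Instead of allocating a 0/1 coverage array of length n, marking every in-range cell per station and scanning all n positions to count zero runs, B sorts the clipped per-station intervals by left endpoint and walks them once, adding ceil-style need gap // (2w+1) (+1 on remainder) for each uncovered gap directly.
import Mathlib
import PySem

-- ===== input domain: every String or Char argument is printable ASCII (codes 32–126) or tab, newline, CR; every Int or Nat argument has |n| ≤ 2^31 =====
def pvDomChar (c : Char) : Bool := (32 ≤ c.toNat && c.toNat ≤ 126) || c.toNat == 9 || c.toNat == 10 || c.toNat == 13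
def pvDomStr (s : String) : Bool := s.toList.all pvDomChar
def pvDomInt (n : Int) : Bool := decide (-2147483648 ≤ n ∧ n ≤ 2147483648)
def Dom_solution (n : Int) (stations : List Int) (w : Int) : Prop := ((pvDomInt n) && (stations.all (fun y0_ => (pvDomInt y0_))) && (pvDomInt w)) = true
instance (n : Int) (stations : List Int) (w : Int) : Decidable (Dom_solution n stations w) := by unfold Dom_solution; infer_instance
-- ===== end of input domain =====

-- B replaces A's coverage array over all n positions and its position-by-position scan by
-- sorting the clipped station intervals and summing the need of each uncovered gap directly
-- (objective: faster — work depends on the number of stations, not on n).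

-- ===== PORT A =====
def solution (n : Int) (stations : List Int) (w : Int) : Int :=
  let myList : List Int := (PySem.List.pyRange 0 n 1).map (fun _ => 0)
  let myList := stations.foldl (fun l station =>
      (PySem.List.pyRange (max 0 (station - 1 - w)) ((min (n - 1) (station - 1 + w)) + 1) 1).foldl
        (fun l2 i => PySem.List.pySetD l2 i 1) l) myList
  let res := (PySem.List.pyRange 0 n 1).foldl (fun st i =>
      if PySem.List.pyGetD myList i 0 == 0 then (st.1, st.2 + 1)
      else (st.1 + (if PySem.Int.mod st.2 (2 * w + 1) == 0 then PySem.Int.floordiv st.2 (2 * w + 1)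
                    else PySem.Int.floordiv st.2 (2 * w + 1) + 1), 0)) ((0 : Int), (0 : Int))
  if res.2 > 0 then
    res.1 + (if PySem.Int.mod res.2 (2 * w + 1) == 0 then PySem.Int.floordiv res.2 (2 * w + 1)
             else PySem.Int.floordiv res.2 (2 * w + 1) + 1)
  else res.1

-- ===== PORT B =====
-- helper _need(gap, d) of Source B
def needB (d gap : Int) : Int :=
  if PySem.Int.mod gap d == 0 then PySem.Int.floordiv gap d else PySem.Int.floordiv gap d + 1

def solution_alt (n : Int) (stations : List Int) (w : Int) : Int :=
  let d := 2 * w + 1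
  let intervals := PySem.List.sorted
    (stations.map (fun s => (max 0 (s - 1 - w), min (n - 1) (s - 1 + w)))) (fun iv => iv.1) false
  let res := intervals.foldl (fun st lr =>
      if lr.2 < lr.1 then st
      else (if lr.1 > st.2 then st.1 + needB d (lr.1 - st.2) else st.1,
            if lr.2 + 1 > st.2 then lr.2 + 1 else st.2)) ((0 : Int), (0 : Int))
  if res.2 < n then res.1 + needB d (n - res.2) else res.1

-- ===== PRECONDITION & SPEC =====
def Spec_solution (n : Int) (stations : List Int) (w : Int) (out : Int) : Prop := out = solution_alt n stations w
instance (n : Int) (stations : List Int) (w : Int) (out : Int) : Decidable (Spec_solution n stations w out) := by unfold Spec_solution; infer_instance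

-- ===== CLAIM (what is proved, stated in full; the proofs are below) =====
def Claim_equal_solution : Prop := ∀ (n : Int) (stations : List Int) (w : Int), Dom_solution n stations w → Spec_solution n stations w (solution n stations w)

-- ===== LEMMAS AND PROOFS =====

-- coverage predicate of a list of closed intervals
def covI (ivs : List (Int × Int)) (i : Int) : Bool := ivs.any (fun p => decide (p.1 ≤ i ∧ i ≤ p.2))

-- one step of A's counting scan, on the coverage bit
def stepv (d : Int) (st : Int × Int) (b : Bool) : Int × Int :=
  if b then (st.1 + needB d st.2, 0) else (st.1, st.2 + 1)

-- A's scan (the fold plus the trailing-run flush) over a list of coverage bits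
def valv (d : Int) (st : Int × Int) (bs : List Bool) : Int :=
  let f := bs.foldl (stepv d) st
  if f.2 > 0 then f.1 + needB d f.2 else f.1

theorem mod_zero_left (d : Int) : PySem.Int.mod 0 d = 0 := by
  rw [PySem.Int.mod_eq_zero_iff_dvd]; exact dvd_zero d

theorem needB_zero (d : Int) (hd : d ≠ 0) : needB d 0 = 0 := by
  have h := PySem.Int.floordiv_mul_add_mod 0 d
  rw [mod_zero_left] at h; simp at h
  rcases h with h | h
  · simp [needB, mod_zero_left, h]
  · exact absurd h hd

theorem valv_nil (d a cz : Int) : valv d (a, cz) [] = if cz > 0 then a + needB d cz else a := rfl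

theorem valv_cons (d : Int) (st : Int × Int) (b : Bool) (bs : List Bool) :
    valv d st (b :: bs) = valv d (stepv d st b) bs := rfl

theorem valv_shift (d : Int) (bs : List Bool) : ∀ a cz : Int, valv d (a, cz) bs = a + valv d (0, cz) bs := by
  induction bs with
  | nil => intro a cz; rw [valv_nil, valv_nil]; split_ifs <;> ring
  | cons b bs ih =>
    intro a cz
    cases b
    · rw [valv_cons, valv_cons]; simp only [stepv, Bool.false_eq_true, ite_false]
      exact ih a (cz + 1)
    · rw [valv_cons, valv_cons]; simp only [stepv, ite_true]
      rw [ih (a + needB d cz) 0, ih (0 + needB d cz) 0]; ring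

theorem pySetD_map_range (n : Int) (g : Int → Int) (a : Int) (ha : 0 ≤ a) :
    PySem.List.pySetD ((PySem.List.pyRange 0 n 1).map g) a 1
    = (PySem.List.pyRange 0 n 1).map (fun i => if i = a then 1 else g i) := by
  rw [PySem.List.pySetD_of_nonneg _ _ ha]
  apply List.ext_getElem
  · simp
  · intro k h1 h2
    simp only [List.length_set, List.length_map] at h1
    rw [List.getElem_set, List.getElem_map, List.getElem_map, PySem.List.getElem_pyRange_one]
    have hk : ((PySem.List.pyRange 0 n 1)[k] : Int) = 0 + k := PySem.List.getElem_pyRange_one _ _ _ _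
    split_ifs with hEq hEq2 hEq2
    · rfl
    · exfalso; apply hEq2; omega
    · exfalso; apply hEq; omega
    · rfl

theorem set_range_aux (n : Int) : ∀ (k : Nat) (b a : Int) (g : Int → Int), 0 ≤ a → (b - a).toNat = k →
    (PySem.List.pyRange a b 1).foldl (fun l2 i => PySem.List.pySetD l2 i 1)
      ((PySem.List.pyRange 0 n 1).map g)
    = (PySem.List.pyRange 0 n 1).map (fun i => if a ≤ i ∧ i < b then (1 : Int) else g i) := by
  intro k
  induction k with
  | zero =>
    intro b a g ha hk
    rw [PySem.List.pyRange_one_eq_nil (a := a) (b := b) (by omega)]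
    simp only [List.foldl_nil]
    exact (List.map_congr_left (fun i _ => by rw [if_neg (by omega)])).symm
  | succ k ih =>
    intro b a g ha hk
    rw [PySem.List.pyRange_one_cons (a := a) (b := b) (by omega)]
    simp only [List.foldl_cons]
    rw [pySetD_map_range n g a ha]
    rw [ih b (a + 1) _ (by omega) (by omega)]
    apply List.map_congr_left
    intro i _
    by_cases h1 : a + 1 ≤ i ∧ i < b
    · rw [if_pos h1, if_pos (by omega)]
    · rw [if_neg h1]
      by_cases h2 : i = a
      · rw [if_pos h2, if_pos (by omega)]
      · rw [if_neg h2, if_neg (by omega)]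

theorem set_range (n b a : Int) (g : Int → Int) (ha : 0 ≤ a) :
    (PySem.List.pyRange a b 1).foldl (fun l2 i => PySem.List.pySetD l2 i 1)
      ((PySem.List.pyRange 0 n 1).map g)
    = (PySem.List.pyRange 0 n 1).map (fun i => if a ≤ i ∧ i < b then (1 : Int) else g i) :=
  set_range_aux n (b - a).toNat b a g ha rfl

theorem mark_all (n w : Int) : ∀ (sts : List Int) (g : Int → Int),
    sts.foldl (fun l station =>
      (PySem.List.pyRange (max 0 (station - 1 - w)) ((min (n - 1) (station - 1 + w)) + 1) 1).foldl
        (fun l2 i => PySem.List.pySetD l2 i 1) l) ((PySem.List.pyRange 0 n 1).map g)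
    = (PySem.List.pyRange 0 n 1).map (fun i =>
        if covI (sts.map (fun s => (max 0 (s - 1 - w), min (n - 1) (s - 1 + w)))) i then (1 : Int) else g i) := by
  intro sts
  induction sts with
  | nil =>
    intro g
    simp only [List.foldl_nil, List.map_nil]
    exact (List.map_congr_left (fun i _ => by simp [covI])).symm
  | cons s sts ih =>
    intro g
    simp only [List.foldl_cons, List.map_cons]
    rw [set_range n ((min (n - 1) (s - 1 + w)) + 1) (max 0 (s - 1 - w)) g (le_max_left 0 _)]
    rw [ih]
    apply List.map_congr_left
    intro i _
    simp only [covI, List.any_cons, Bool.or_eq_true, decide_eq_true_eq]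
    by_cases hrest : (List.map (fun s => (max 0 (s - 1 - w), min (n - 1) (s - 1 + w))) sts).any (fun p => decide (p.1 ≤ i ∧ i ≤ p.2)) = true
    · rw [if_pos hrest, if_pos (Or.inr hrest)]
    · rw [if_neg hrest]
      by_cases hcur : max 0 (s - 1 - w) ≤ i ∧ i < min (n - 1) (s - 1 + w) + 1
      · rw [if_pos hcur, if_pos (Or.inl ⟨hcur.1, by omega⟩)]
      · rw [if_neg hcur, if_neg (by rintro (h | h); exact hcur ⟨h.1, by omega⟩; exact hrest h)]

theorem A_eq_valv (n : Int) (stations : List Int) (w : Int) :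
    solution n stations w
    = valv (2 * w + 1) (0, 0) ((PySem.List.pyRange 0 n 1).map
        (covI (stations.map (fun s => (max 0 (s - 1 - w), min (n - 1) (s - 1 + w)))))) := by
  unfold solution
  simp only []
  rw [mark_all n w stations (fun _ => 0)]
  rw [PySem.List.foldl_congr_mem _ _
    (fun st i => stepv (2 * w + 1) st
      (covI (stations.map (fun s => (max 0 (s - 1 - w), min (n - 1) (s - 1 + w)))) i)) _
    (by
      intro acc i hi
      rw [PySem.List.mem_pyRange_one] at hi
      rw [PySem.List.pyGetD_map_pyRange_of_nonneg _ n i _ hi.1 hi.2]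
      by_cases h : covI (stations.map (fun s => (max 0 (s - 1 - w), min (n - 1) (s - 1 + w)))) i = true
      · simp [h, stepv, needB]
      · simp only [Bool.not_eq_true] at h
        simp [h, stepv])]
  rw [← List.foldl_map]
  rfl

theorem valv_false_seg_aux (d : Int) (c : Int → Bool) : ∀ (k : Nat) (a b : Int) (bs : List Bool) (acc cz : Int),
    (b - a).toNat = k → a ≤ b → (∀ i, a ≤ i → i < b → c i = false) →
    valv d (acc, cz) ((PySem.List.pyRange a b 1).map c ++ bs)
    = valv d (acc, cz + (b - a)) bs := by
  intro k
  induction k with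
  | zero =>
    intro a b bs acc cz hk hab hc
    rw [PySem.List.pyRange_one_eq_nil (by omega)]
    have : cz + (b - a) = cz := by omega
    simp [this]
  | succ k ih =>
    intro a b bs acc cz hk hab hc
    rw [PySem.List.pyRange_one_cons (by omega)]
    simp only [List.map_cons, List.cons_append]
    rw [hc a le_rfl (by omega)]
    rw [valv_cons]
    simp only [stepv, Bool.false_eq_true, ite_false]
    rw [ih (a + 1) b bs acc (cz + 1) (by omega) (by omega) (fun i h1 h2 => hc i (by omega) h2)]
    have : cz + 1 + (b - (a + 1)) = cz + (b - a) := by ring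
    rw [this]

theorem valv_true_seg_aux (d : Int) (hd : d ≠ 0) (c : Int → Bool) : ∀ (k : Nat) (a b : Int) (bs : List Bool) (acc : Int),
    (b - a).toNat = k → (∀ i, a ≤ i → i < b → c i = true) →
    valv d (acc, 0) ((PySem.List.pyRange a b 1).map c ++ bs)
    = valv d (acc, 0) bs := by
  intro k
  induction k with
  | zero =>
    intro a b bs acc hk hc
    rw [PySem.List.pyRange_one_eq_nil (by omega)]
    simp
  | succ k ih =>
    intro a b bs acc hk hc
    rw [PySem.List.pyRange_one_cons (by omega)]
    simp only [List.map_cons, List.cons_append]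
    rw [hc a le_rfl (by omega)]
    rw [valv_cons]
    simp only [stepv, ite_true, needB_zero d hd, add_zero]
    exact ih (a + 1) b bs acc (by omega) (fun i h1 h2 => hc i (by omega) h2)

theorem covI_congr_seg (ivs ivs' : List (Int × Int)) (a b : Int)
    (h : ∀ i, a ≤ i → i < b → covI ivs i = covI ivs' i) :
    (PySem.List.pyRange a b 1).map (covI ivs) = (PySem.List.pyRange a b 1).map (covI ivs') :=
  List.map_congr_left (fun i hi => by
    rw [PySem.List.mem_pyRange_one] at hi
    exact h i hi.1 hi.2)

theorem covI_drop (p : Int × Int) (rest : List (Int × Int)) (a b : Int)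
    (h : ∀ i, a ≤ i → i < b → ¬(p.1 ≤ i ∧ i ≤ p.2)) :
    (PySem.List.pyRange a b 1).map (covI (p :: rest)) = (PySem.List.pyRange a b 1).map (covI rest) :=
  covI_congr_seg _ _ _ _ (fun i h1 h2 => by
    simp only [covI, List.any_cons]
    rw [decide_eq_false (h i h1 h2), Bool.false_or])

theorem B_main (n d : Int) (hd : d ≠ 0) : ∀ (ivs : List (Int × Int)) (acc pos : Int),
    ivs.Pairwise (fun p q => p.1 ≤ q.1) →
    (∀ p ∈ ivs, p.2 ≤ n - 1) →
    (let res := ivs.foldl (fun st lr =>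
        if lr.2 < lr.1 then st
        else (if lr.1 > st.2 then st.1 + needB d (lr.1 - st.2) else st.1,
              if lr.2 + 1 > st.2 then lr.2 + 1 else st.2)) (acc, pos)
     if res.2 < n then res.1 + needB d (n - res.2) else res.1)
    = acc + valv d (0, 0) ((PySem.List.pyRange pos n 1).map (covI ivs)) := by
  intro ivs
  induction ivs with
  | nil =>
    intro acc pos _ _
    simp only [List.foldl_nil]
    by_cases hp : pos < n
    · rw [if_pos hp]
      have h0 : (PySem.List.pyRange pos n 1).map (covI []) ++ ([] : List Bool)
          = (PySem.List.pyRange pos n 1).map (covI []) := List.append_nil _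
      rw [← h0, valv_false_seg_aux d (covI []) (n - pos).toNat pos n [] 0 0 rfl (by omega)
          (fun i _ _ => by simp [covI])]
      rw [valv_nil]
      rw [if_pos (by omega : (0 : Int) + (n - pos) > 0)]
      ring_nf
    · rw [if_neg hp]
      rw [PySem.List.pyRange_one_eq_nil (by omega)]
      simp [valv_nil]
  | cons p rest ih =>
    intro acc pos hsort hub
    have hfst : ∀ q ∈ rest, p.1 ≤ q.1 := (List.pairwise_cons.mp hsort).1
    have hsort2 := (List.pairwise_cons.mp hsort).2
    have hubp : p.2 ≤ n - 1 := hub p List.mem_cons_self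
    have hub2 : ∀ q ∈ rest, q.2 ≤ n - 1 := fun q hq => hub q (List.mem_cons_of_mem _ hq)
    simp only [List.foldl_cons]
    by_cases hempty : p.2 < p.1
    · rw [if_pos hempty]
      rw [ih acc pos hsort2 hub2]
      rw [covI_drop p rest _ _ (fun i _ _ => by omega)]
    · rw [if_neg hempty]
      by_cases hgap : p.1 > pos
      · -- uncovered gap [pos, p.1), then p covers [p.1, p.2+1)
        have hadv : p.2 + 1 > pos := by omega
        rw [if_pos hgap, if_pos hadv]
        rw [ih (acc + needB d (p.1 - pos)) (p.2 + 1) hsort2 hub2]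
        rw [PySem.List.pyRange_one_append pos p.1 n (by omega) (by omega)]
        rw [PySem.List.pyRange_one_append p.1 (p.2 + 1) n (by omega) (by omega)]
        rw [List.map_append, List.map_append]
        rw [valv_false_seg_aux d (covI (p :: rest)) (p.1 - pos).toNat pos p.1 _ 0 0 rfl (by omega)
            (fun i h1 h2 => by
              simp only [covI, List.any_cons]
              rw [decide_eq_false (by omega), Bool.false_or]
              apply List.any_eq_false.mpr
              intro q hq
              have := hfst q hq
              simp only [decide_eq_true_eq]
              omega)]
        rw [PySem.List.pyRange_one_cons (a := p.1) (b := p.2 + 1) (by omega)]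
        simp only [List.map_cons, List.cons_append]
        have hcov : covI (p :: rest) p.1 = true := by
          simp only [covI, List.any_cons, Bool.or_eq_true, decide_eq_true_eq]
          exact Or.inl ⟨le_rfl, by omega⟩
        rw [hcov, valv_cons]
        simp only [stepv, ite_true, zero_add]
        rw [valv_true_seg_aux d hd (covI (p :: rest)) (p.2 + 1 - (p.1 + 1)).toNat (p.1 + 1) (p.2 + 1) _ _ rfl
            (fun i h1 h2 => by
              simp only [covI, List.any_cons, Bool.or_eq_true, decide_eq_true_eq]
              exact Or.inl ⟨by omega, by omega⟩)]
        rw [covI_drop p rest _ _ (fun i h1 _ => by omega)]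
        rw [valv_shift d _ (needB d (p.1 - pos)) 0]
        ring
      · rw [if_neg hgap]
        by_cases hadv : p.2 + 1 > pos
        · rw [if_pos hadv]
          rw [ih acc (p.2 + 1) hsort2 hub2]
          rw [PySem.List.pyRange_one_append pos (p.2 + 1) n (by omega) (by omega)]
          rw [List.map_append]
          rw [valv_true_seg_aux d hd (covI (p :: rest)) (p.2 + 1 - pos).toNat pos (p.2 + 1) _ _ rfl
              (fun i h1 h2 => by
                simp only [covI, List.any_cons, Bool.or_eq_true, decide_eq_true_eq]
                exact Or.inl ⟨by omega, by omega⟩)]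
          rw [covI_drop p rest _ _ (fun i h1 _ => by omega)]
        · rw [if_neg hadv]
          rw [ih acc pos hsort2 hub2]
          rw [covI_drop p rest _ _ (fun i h1 _ => by omega)]

theorem B_eq_valv (n : Int) (stations : List Int) (w : Int) :
    solution_alt n stations w
    = valv (2 * w + 1) (0, 0) ((PySem.List.pyRange 0 n 1).map
        (covI (stations.map (fun s => (max 0 (s - 1 - w), min (n - 1) (s - 1 + w)))))) := by
  unfold solution_alt
  simp only []
  have hd : (2 * w + 1 : Int) ≠ 0 := by omega
  set ivs0 := stations.map (fun s => (max 0 (s - 1 - w), min (n - 1) (s - 1 + w))) with hivs0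
  have hperm : (PySem.List.sorted ivs0 (fun iv => iv.1) false).Perm ivs0 :=
    PySem.List.sorted_perm ivs0 (fun iv => iv.1) false
  have hpair : (PySem.List.sorted ivs0 (fun iv => iv.1) false).Pairwise (fun p q => p.1 ≤ q.1) :=
    PySem.List.sorted_pairwise ivs0 (fun iv => iv.1)
  have hub : ∀ p ∈ PySem.List.sorted ivs0 (fun iv => iv.1) false, p.2 ≤ n - 1 := by
    intro p hp
    rw [PySem.List.mem_sorted] at hp
    rw [hivs0] at hp
    rcases List.mem_map.mp hp with ⟨s, _, rfl⟩
    exact min_le_left _ _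
  rw [B_main n (2 * w + 1) hd (PySem.List.sorted ivs0 (fun iv => iv.1) false) 0 0 hpair hub]
  rw [zero_add]
  congr 1
  apply List.map_congr_left
  intro i _
  simp only [covI]
  exact hperm.any_eq

-- ===== VERDICT (by name: the statement is the Claim_ definition above) =====
theorem solution_spec : Claim_equal_solution := by
  intro n stations w _
  unfold Spec_solution
  rw [A_eq_valv, B_eq_valv]
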